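-- pv_equiv track=rewrite | github.com/FDlucifer/offensive-go-python-rust | leetcode-python-go/LCP 41. 黑白翻转棋/main.py | flipChess
-- ===== SOURCE A (Python) =====
-- from typing import List
-- from collections import deque
--
-- def flipChess(chessboard: List[str]) -> int:
--     m = len(chessboard)
--     n = len(chessboard[0])
--     direct = [[0, 1], [1, 1], [1, 0], [1, -1], [0, -1], [-1, -1], [-1, 0], [-1, 1]]
--
--     def dfs(si, sj):
--         res = 0
--         stack = deque([(si, sj)])
--         is_x = set()
--         is_x.add((si, sj))
--         while stack:
--             for _ in range(len(stack)):
--                 ti, tj = stack.popleft()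
--                 for di, dj in direct:
--                     olis = []
--                     i, j = ti + di, tj + dj
--                     while m > i > -1 < j < n and chessboard[i][j] != '.':
--                         if (i, j) in is_x or chessboard[i][j] == 'X':
--                             res += len(olis)
--                             stack.extend(olis)
--                             is_x.update(olis)
--                             break
--                         elif chessboard[i][j] == 'O':
--                             olis.append((i, j))
--                             i += di
--                             j += dj
--         return res
--     ans = 0
--     for i in range(m):
--         for j in range(n):
--             if chessboard[i][j] == '.':
--                 t = dfs(i, j)
--                 ans = max(ans, t)
--     return ans
-- ===== SOURCE B (Python) =====
-- from typing import List
--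
--
-- def flipChess(chessboard: List[str]) -> int:
--     m, n = len(chessboard), len(chessboard[0])
--     dirs = ((0, 1), (1, 1), (1, 0), (1, -1), (0, -1), (-1, -1), (-1, 0), (-1, 1))
--
--     def ray(i, j, di, dj, flipped):
--         # white cells strictly between (i,j) and the nearest blocker in direction
--         # (di,dj), provided that blocker is a black or an already-flipped piece
--         cells = []
--         i += di
--         j += dj
--         while 0 <= i < m and 0 <= j < n and chessboard[i][j] != '.':
--             if chessboard[i][j] == 'X' or (i, j) in flipped:
--                 return cells
--             cells.append((i, j))
--             i += di
--             j += dj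
--         return []
--
--     def flood(flipped, frontier):
--         # saturate: every newly flipped cell gets its own 8 rays re-checked
--         if not frontier:
--             return flipped
--         nxt = []
--         for i, j in frontier:
--             for di, dj in dirs:
--                 for c in ray(i, j, di, dj, flipped):
--                     flipped.add(c)
--                     nxt.append(c)
--         return flood(flipped, nxt)
--
--     return max((len(flood({(i, j)}, [(i, j)])) - 1
--                 for i in range(m) for j in range(n) if chessboard[i][j] == '.'),
--                default=0)
-- ===== Notes on version B (the rewrite author's own statement) =====
-- stated objective: simpler
-- what changed: Replaces A's deque-BFS with its running res counter and per-level inner loop by a recursive frontier flood that keeps a single set of flipped cells per start and returns len(flipped)-1, with the directional scan factored into a pure ray helper.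
-- outside the precondition, e.g. on flipChess(['.X$']): A returns 0, B returns 0
import Mathlib
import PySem

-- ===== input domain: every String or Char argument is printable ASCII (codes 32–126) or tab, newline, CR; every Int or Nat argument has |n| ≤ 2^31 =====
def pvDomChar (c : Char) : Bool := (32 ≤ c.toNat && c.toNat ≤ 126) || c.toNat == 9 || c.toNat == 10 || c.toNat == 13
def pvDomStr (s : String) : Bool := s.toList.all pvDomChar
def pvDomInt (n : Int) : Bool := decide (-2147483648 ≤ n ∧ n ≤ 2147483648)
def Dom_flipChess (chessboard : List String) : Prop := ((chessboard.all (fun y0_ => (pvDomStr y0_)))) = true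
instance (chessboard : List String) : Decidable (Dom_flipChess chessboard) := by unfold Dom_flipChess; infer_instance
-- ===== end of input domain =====

-- B replaces A's deque-BFS with an explicit per-cell counter by a recursive frontier flood
-- that keeps one set of flipped cells and returns its size minus one (objective: simpler).

-- shared board helpers: the 8 directions and the (guarded, always in-bounds) cell access
def pvDirs : List (Int × Int) :=
  [(0,1),(1,1),(1,0),(1,-1),(0,-1),(-1,-1),(-1,0),(-1,1)]

def pvCell (b : List (List Char)) (i j : Int) : Char :=
  (b.getD i.toNat []).getD j.toNat ' '

-- fuel bounds (totality guards only: large enough for every run the proofs talk about)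
def pvFw (m n : Int) : Nat := m.toNat + n.toNat + 2
def pvFl (m n : Int) : Nat := m.toNat * n.toNat + 1

-- ===== PORT A =====
-- inner while of dfs: scan one direction, collecting consecutive 'O' cells (olis);
-- `some olis` = the Python `break` after a flip, `none` = the while ran out (no flip).
-- The branch where the cell is neither flipped, 'X' nor 'O' loops in Python without
-- advancing; here it burns fuel the same way (Pre_ excludes those boards).
def pvWalkA (b : List (List Char)) (m n : Int) (isx : PySem.Set (Int × Int))
    (di dj : Int) : Nat → Int → Int → List (Int × Int) → Option (List (Int × Int))
  | 0, _, _, _ => none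
  | fuel+1, i, j, olis =>
    if m > i ∧ i > -1 ∧ -1 < j ∧ j < n ∧ pvCell b i j ≠ '.' then
      if PySem.Set.contains isx (i, j) ∨ pvCell b i j = 'X' then some olis
      else if pvCell b i j = 'O' then
        pvWalkA b m n isx di dj fuel (i + di) (j + dj) (olis ++ [(i, j)])
      else pvWalkA b m n isx di dj fuel i j olis
    else none

-- body of `for di, dj in direct` for one popped cell (ti,tj); state = (res, is_x, stack)
def pvDirStepA (b : List (List Char)) (m n : Int) (fw : Nat) (ti tj : Int)
    (st : Int × PySem.Set (Int × Int) × List (Int × Int)) (d : Int × Int) :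
    Int × PySem.Set (Int × Int) × List (Int × Int) :=
  match pvWalkA b m n st.2.1 d.1 d.2 fw (ti + d.1) (tj + d.2) [] with
  | some olis => (st.1 + (olis.length : Int), PySem.Set.update st.2.1 olis, st.2.2 ++ olis)
  | none => st

def pvStepA (b : List (List Char)) (m n : Int) (fw : Nat) (ti tj : Int)
    (st : Int × PySem.Set (Int × Int) × List (Int × Int)) :
    Int × PySem.Set (Int × Int) × List (Int × Int) :=
  pvDirs.foldl (pvDirStepA b m n fw ti tj) st

-- `for _ in range(len(stack))`: pop the front k times
def pvLevelA (b : List (List Char)) (m n : Int) (fw : Nat) :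
    Nat → Int × PySem.Set (Int × Int) × List (Int × Int) →
    Int × PySem.Set (Int × Int) × List (Int × Int)
  | 0, st => st
  | k+1, st =>
    match st.2.2 with
    | [] => st
    | c :: rest => pvLevelA b m n fw k (pvStepA b m n fw c.1 c.2 (st.1, st.2.1, rest))

-- `while stack:` (fuel-guarded)
def pvLoopA (b : List (List Char)) (m n : Int) (fw : Nat) :
    Nat → Int × PySem.Set (Int × Int) × List (Int × Int) → Int
  | 0, st => st.1
  | f+1, st =>
    if st.2.2 = [] then st.1
    else pvLoopA b m n fw f (pvLevelA b m n fw st.2.2.length st)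

def pvDfsA (b : List (List Char)) (m n : Int) (si sj : Int) : Int :=
  pvLoopA b m n (pvFw m n) (pvFl m n)
    (0, PySem.Set.ofList [(si, sj)], [(si, sj)])

def flipChess (chessboard : List String) : Int :=
  let b := chessboard.map (fun s => s.toList)
  let m : Int := (chessboard.length : Int)
  let n : Int := ((chessboard.headD "").toList.length : Int)
  (PySem.List.pyRange 0 m 1).foldl (fun ans i =>
    (PySem.List.pyRange 0 n 1).foldl (fun ans j =>
      if pvCell b i j = '.' then max ans (pvDfsA b m n i j) else ans) ans) 0

-- ===== PORT B =====
-- ray: the white cells strictly between (i,j)+(di,dj)... and the nearest blocker,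
-- `some cells` iff that blocker is an 'X' or an already-flipped cell (else no flip).
def pvRayB (b : List (List Char)) (m n : Int) (fl : PySem.Set (Int × Int))
    (di dj : Int) : Nat → Int → Int → Option (List (Int × Int))
  | 0, _, _ => none
  | fuel+1, i, j =>
    if 0 ≤ i ∧ i < m ∧ 0 ≤ j ∧ j < n ∧ pvCell b i j ≠ '.' then
      if pvCell b i j = 'X' ∨ PySem.Set.contains fl (i, j) then some []
      else (pvRayB b m n fl di dj fuel (i + di) (j + dj)).map (fun l => (i, j) :: l)
    else none

-- one direction of one frontier cell; p = (flipped, nxt)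
def pvDirStepB (b : List (List Char)) (m n : Int) (fw : Nat) (ci cj : Int)
    (p : PySem.Set (Int × Int) × List (Int × Int)) (d : Int × Int) :
    PySem.Set (Int × Int) × List (Int × Int) :=
  let cells := (pvRayB b m n p.1 d.1 d.2 fw (ci + d.1) (cj + d.2)).getD []
  (PySem.Set.update p.1 cells, p.2 ++ cells)

def pvCellStepB (b : List (List Char)) (m n : Int) (fw : Nat)
    (p : PySem.Set (Int × Int) × List (Int × Int)) (c : Int × Int) :
    PySem.Set (Int × Int) × List (Int × Int) :=
  pvDirs.foldl (pvDirStepB b m n fw c.1 c.2) p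

-- flood: saturate level by level; returns the final flipped set
def pvFloodB (b : List (List Char)) (m n : Int) (fw : Nat) :
    Nat → PySem.Set (Int × Int) → List (Int × Int) → PySem.Set (Int × Int)
  | 0, fl, _ => fl
  | f+1, fl, frontier =>
    if frontier = [] then fl
    else
      let p := frontier.foldl (pvCellStepB b m n fw) (fl, [])
      pvFloodB b m n fw f p.1 p.2

def flipChess_alt (chessboard : List String) : Int :=
  let b := chessboard.map (fun s => s.toList)
  let m : Int := (chessboard.length : Int)
  let n : Int := ((chessboard.headD "").toList.length : Int)
  let vals : List Int :=
    (PySem.List.pyRange 0 m 1).flatMap (fun i =>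
      (PySem.List.pyRange 0 n 1).filterMap (fun j =>
        if pvCell b i j = '.' then
          some (((pvFloodB b m n (pvFw m n) (pvFl m n)
            (PySem.Set.ofList [(i, j)]) [(i, j)]).length : Int) - 1)
        else none))
  (PySem.List.max? vals (fun x => x)).getD 0

-- ===== PRECONDITION & SPEC =====
-- Pre_ excludes boards on which A raises (empty board, a row shorter than row 0:
-- IndexError) and boards that contain a '.' together with a character other than
-- '.', 'X', 'O' in the scanned columns, on which A's ray walk can loop forever;
-- it also (conservatively) excludes such mixed-character boards where the stray
-- character happens to be unreachable and A still returns.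
def Pre_flipChess (chessboard : List String) : Prop :=
  chessboard ≠ [] ∧
  (chessboard.all (fun r =>
    decide ((chessboard.headD "").toList.length ≤ r.toList.length)) = true) ∧
  ((chessboard.any (fun r =>
      (r.toList.take (chessboard.headD "").toList.length).contains '.') = true) →
    chessboard.all (fun r =>
      (r.toList.take (chessboard.headD "").toList.length).all
        (fun c => c == '.' || c == 'X' || c == 'O')) = true)
instance (chessboard : List String) : Decidable (Pre_flipChess chessboard) := by
  unfold Pre_flipChess; infer_instance

def pvWitness_flipChess : List String := ["OX", ".O"]

def Spec_flipChess (chessboard : List String) (out : Int) : Prop := out = flipChess_alt chessboard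
instance (chessboard : List String) (out : Int) : Decidable (Spec_flipChess chessboard out) := by
  unfold Spec_flipChess; infer_instance

-- ===== CLAIM (what is proved, stated in full; the proofs are below) =====
def Claim_equal_flipChess : Prop := ∀ (chessboard : List String), Dom_flipChess chessboard → Pre_flipChess chessboard → Spec_flipChess chessboard (flipChess chessboard)

-- ===== LEMMAS AND PROOFS =====

-- every in-bounds cell is '.', 'X' or 'O'
def pvClean (b : List (List Char)) (m n : Int) : Prop :=
  ∀ i j : Int, 0 ≤ i → i < m → 0 ≤ j → j < n →
    pvCell b i j = '.' ∨ pvCell b i j = 'X' ∨ pvCell b i j = 'O'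

lemma pv_walk_eq_ray (b : List (List Char)) (m n : Int) (isx : PySem.Set (Int × Int))
    (di dj : Int) (hcl : pvClean b m n) :
    ∀ (fuel : Nat) (i j : Int) (acc : List (Int × Int)),
      pvWalkA b m n isx di dj fuel i j acc
        = (pvRayB b m n isx di dj fuel i j).map (fun l => acc ++ l) := by
  intro fuel
  induction fuel with
  | zero => intro i j acc; rfl
  | succ f ih =>
    intro i j acc
    rw [pvWalkA, pvRayB]
    by_cases hg : 0 ≤ i ∧ i < m ∧ 0 ≤ j ∧ j < n ∧ pvCell b i j ≠ '.'
    · obtain ⟨hg1, hg2, hg3, hg4, hg5⟩ := hg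
      conv_lhs => rw [if_pos (show m > i ∧ i > -1 ∧ -1 < j ∧ j < n ∧ pvCell b i j ≠ '.'
        from ⟨by omega, by omega, by omega, hg4, hg5⟩)]
      conv_rhs => rw [if_pos (show 0 ≤ i ∧ i < m ∧ 0 ≤ j ∧ j < n ∧ pvCell b i j ≠ '.'
        from ⟨hg1, hg2, hg3, hg4, hg5⟩)]
      by_cases ht : pvCell b i j = 'X' ∨ PySem.Set.contains isx (i, j) = true
      · conv_lhs => rw [if_pos (show PySem.Set.contains isx (i, j) = true ∨ pvCell b i j = 'X'
          from ht.symm)]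
        conv_rhs => rw [if_pos ht]
        simp
      · conv_lhs => rw [if_neg (show ¬(PySem.Set.contains isx (i, j) = true ∨ pvCell b i j = 'X')
          from fun h => ht h.symm)]
        conv_rhs => rw [if_neg ht]
        have hO : pvCell b i j = 'O' := by
          rcases hcl i j hg1 hg2 hg3 hg4 with h | h | h
          · exact absurd h hg5
          · exact absurd (Or.inl h) ht
          · exact h
        rw [if_pos hO, ih (i + di) (j + dj) (acc ++ [(i, j)])]
        cases pvRayB b m n isx di dj f (i + di) (j + dj) <;> simp
    · conv_lhs => rw [if_neg (show ¬(m > i ∧ i > -1 ∧ -1 < j ∧ j < n ∧ pvCell b i j ≠ '.')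
        from fun h => hg ⟨by omega, by omega, by omega, h.2.2.2.1, h.2.2.2.2⟩)]
      conv_rhs => rw [if_neg hg]
      rfl

lemma pv_ray_spec (b : List (List Char)) (m n : Int) (fl : PySem.Set (Int × Int))
    (di dj : Int) (hd : ¬(di = 0 ∧ dj = 0)) :
    ∀ (fuel : Nat) (i j : Int) (l : List (Int × Int)),
      pvRayB b m n fl di dj fuel i j = some l →
        l.Nodup ∧ (∀ c ∈ l, ¬ c ∈ fl) ∧
          (∀ c ∈ l, ∃ k : Nat, c.1 = i + (k : Int) * di ∧ c.2 = j + (k : Int) * dj) := by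
  intro fuel
  induction fuel with
  | zero => intro i j l h; exact absurd h (by simp [pvRayB])
  | succ f ih =>
    intro i j l h
    rw [pvRayB] at h
    split_ifs at h with h1 h2
    · -- terminator: l = []
      simp only [Option.some.injEq] at h
      subst h
      exact ⟨List.nodup_nil, by simp, by simp⟩
    · -- step: l = (i,j) :: l'
      rw [Option.map_eq_some_iff] at h
      obtain ⟨l', hl', rfl⟩ := h
      obtain ⟨hnd, hfr, hpos⟩ := ih (i + di) (j + dj) l' hl'
      have hshift : ∀ c ∈ l', ∃ k : Nat, c.1 = i + (k : Int) * di ∧ c.2 = j + (k : Int) * dj := by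
        intro c hc
        obtain ⟨k, hk1, hk2⟩ := hpos c hc
        exact ⟨k + 1, by push_cast; linarith, by push_cast; linarith⟩
      refine ⟨List.nodup_cons.mpr ⟨?_, hnd⟩, ?_, ?_⟩
      · intro hmem
        obtain ⟨k, hk1, hk2⟩ := hpos (i, j) hmem
        have hdi : di = 0 := by
          have : ((k : Int) + 1) * di = 0 := by push_cast at hk1 ⊢; linarith
          rcases mul_eq_zero.mp this with h | h
          · omega
          · exact h
        have hdj : dj = 0 := by
          have : ((k : Int) + 1) * dj = 0 := by push_cast at hk2 ⊢; linarith
          rcases mul_eq_zero.mp this with h | h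
          · omega
          · exact h
        exact hd ⟨hdi, hdj⟩
      · intro c hc
        rcases List.mem_cons.mp hc with rfl | hc'
        · intro hmem
          exact h2 (Or.inr ((PySem.Set.contains_iff _ _).mpr hmem))
        · exact hfr c hc'
      · intro c hc
        rcases List.mem_cons.mp hc with rfl | hc'
        · exact ⟨0, by simp, by simp⟩
        · exact hshift c hc'

lemma pv_update_length (l : List (Int × Int)) :
    ∀ (s : PySem.Set (Int × Int)), l.Nodup → (∀ c ∈ l, ¬ c ∈ s) →
      (PySem.Set.update s l).length = s.length + l.length := by
  induction l with
  | nil => intro s _ _; simp [PySem.Set.update_nil]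
  | cons c t ih =>
    intro s hnd hfr
    rw [PySem.Set.update_cons, PySem.Set.add_of_not_mem (hfr c (by simp))]
    rw [ih (s ++ [c]) hnd.of_cons]
    · simp; omega
    · intro x hx
      simp only [List.mem_append, List.mem_singleton]
      rintro (h | rfl)
      · exact hfr x (by simp [hx]) h
      · exact (List.nodup_cons.mp hnd).1 hx

lemma pv_update_length_ge (l : List (Int × Int)) :
    ∀ (s : PySem.Set (Int × Int)), s.length ≤ (PySem.Set.update s l).length := by
  induction l with
  | nil => intro s; simp [PySem.Set.update_nil]
  | cons c t ih =>
    intro s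
    rw [PySem.Set.update_cons]
    refine le_trans ?_ (ih (PySem.Set.add s c))
    rw [PySem.Set.add_eq_ite]
    split <;> simp

-- the (flipped, nxt) fold only appends to nxt, and flipped does not depend on nxt
lemma pv_dirfold_append (b : List (List Char)) (m n : Int) (fw : Nat) (ci cj : Int) :
    ∀ (ds : List (Int × Int)) (fl : PySem.Set (Int × Int)) (nx : List (Int × Int)),
      ds.foldl (pvDirStepB b m n fw ci cj) (fl, nx)
        = ((ds.foldl (pvDirStepB b m n fw ci cj) (fl, [])).1,
           nx ++ (ds.foldl (pvDirStepB b m n fw ci cj) (fl, [])).2) := by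
  intro ds
  induction ds with
  | nil => intro fl nx; simp
  | cons d t ih =>
    intro fl nx
    simp only [List.foldl_cons]
    rw [show pvDirStepB b m n fw ci cj (fl, nx) d
          = ((pvDirStepB b m n fw ci cj (fl, []) d).1,
             nx ++ (pvDirStepB b m n fw ci cj (fl, []) d).2) from by
        simp [pvDirStepB]]
    rw [ih ((pvDirStepB b m n fw ci cj (fl, []) d).1)
          (nx ++ (pvDirStepB b m n fw ci cj (fl, []) d).2),
        ih ((pvDirStepB b m n fw ci cj (fl, []) d).1)
          ((pvDirStepB b m n fw ci cj (fl, []) d).2)]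
    simp [List.append_assoc]

lemma pv_cellstep_append (b : List (List Char)) (m n : Int) (fw : Nat) (c : Int × Int)
    (fl : PySem.Set (Int × Int)) (nx : List (Int × Int)) :
    pvCellStepB b m n fw (fl, nx) c
      = ((pvCellStepB b m n fw (fl, []) c).1, nx ++ (pvCellStepB b m n fw (fl, []) c).2) := by
  unfold pvCellStepB
  exact pv_dirfold_append b m n fw c.1 c.2 pvDirs fl nx

lemma pv_step_eq (b : List (List Char)) (m n : Int) (fw : Nat) (hcl : pvClean b m n)
    (ti tj : Int) :
    ∀ (ds : List (Int × Int)), (∀ d ∈ ds, ¬(d.1 = 0 ∧ d.2 = 0)) →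
      ∀ (fl : PySem.Set (Int × Int)) (s : List (Int × Int)),
        ds.foldl (pvDirStepA b m n fw ti tj) (((fl.length : Int) - 1), fl, s)
          = (((ds.foldl (pvDirStepB b m n fw ti tj) (fl, s)).1.length : Int) - 1,
             (ds.foldl (pvDirStepB b m n fw ti tj) (fl, s)).1,
             (ds.foldl (pvDirStepB b m n fw ti tj) (fl, s)).2) := by
  intro ds
  induction ds with
  | nil => intro _ fl s; rfl
  | cons d t ih =>
    intro hd fl s
    simp only [List.foldl_cons]
    have hwalk := pv_walk_eq_ray b m n fl d.1 d.2 hcl fw (ti + d.1) (tj + d.2) []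
    cases hr : pvRayB b m n fl d.1 d.2 fw (ti + d.1) (tj + d.2) with
    | none =>
      have hA : pvDirStepA b m n fw ti tj (((fl.length : Int) - 1), fl, s) d
          = (((fl.length : Int) - 1), fl, s) := by
        simp [pvDirStepA, hwalk, hr]
      have hB : pvDirStepB b m n fw ti tj (fl, s) d = (fl, s) := by
        simp [pvDirStepB, hr, PySem.Set.update_nil]
      rw [hA, hB]
      exact ih (fun x hx => hd x (by simp [hx])) fl s
    | some l =>
      obtain ⟨hnd, hfr, _⟩ :=
        pv_ray_spec b m n fl d.1 d.2 (hd d (by simp)) fw (ti + d.1) (tj + d.2) l hr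
      have hlen := pv_update_length l fl hnd hfr
      have hA : pvDirStepA b m n fw ti tj (((fl.length : Int) - 1), fl, s) d
          = ((((PySem.Set.update fl l).length : Int) - 1), PySem.Set.update fl l, s ++ l) := by
        simp only [pvDirStepA, hwalk, hr, Option.map_some, List.nil_append]
        rw [hlen]
        push_cast
        ring_nf
      have hB : pvDirStepB b m n fw ti tj (fl, s) d = (PySem.Set.update fl l, s ++ l) := by
        simp [pvDirStepB, hr]
      rw [hA, hB]
      exact ih (fun x hx => hd x (by simp [hx])) (PySem.Set.update fl l) (s ++ l)

lemma pv_level_eq (b : List (List Char)) (m n : Int) (fw : Nat) (hcl : pvClean b m n) :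
    ∀ (old : List (Int × Int)) (fl : PySem.Set (Int × Int)) (nx : List (Int × Int)),
      pvLevelA b m n fw old.length (((fl.length : Int) - 1), fl, old ++ nx)
        = (((old.foldl (pvCellStepB b m n fw) (fl, nx)).1.length : Int) - 1,
           (old.foldl (pvCellStepB b m n fw) (fl, nx)).1,
           (old.foldl (pvCellStepB b m n fw) (fl, nx)).2) := by
  intro old
  induction old with
  | nil =>
    intro fl nx
    simp [pvLevelA]
  | cons c t ih =>
    intro fl nx
    have hlhs : pvLevelA b m n fw ((c :: t).length) (((fl.length : Int) - 1), fl, (c :: t) ++ nx)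
        = pvLevelA b m n fw t.length
            (pvStepA b m n fw c.1 c.2 (((fl.length : Int) - 1), fl, t ++ nx)) := rfl
    rw [hlhs]
    have hstep : pvStepA b m n fw c.1 c.2 (((fl.length : Int) - 1), fl, t ++ nx)
        = (((pvCellStepB b m n fw (fl, t ++ nx) c).1.length : Int) - 1,
           (pvCellStepB b m n fw (fl, t ++ nx) c).1,
           (pvCellStepB b m n fw (fl, t ++ nx) c).2) :=
      pv_step_eq b m n fw hcl c.1 c.2 pvDirs (by decide) fl (t ++ nx)
    rw [hstep]
    rw [pv_cellstep_append b m n fw c fl (t ++ nx)]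
    have hsplit : (t ++ nx) ++ (pvCellStepB b m n fw (fl, []) c).2
        = t ++ (nx ++ (pvCellStepB b m n fw (fl, []) c).2) := by
      simp [List.append_assoc]
    simp only [hsplit]
    rw [ih ((pvCellStepB b m n fw (fl, []) c).1) (nx ++ (pvCellStepB b m n fw (fl, []) c).2)]
    rw [List.foldl_cons, pv_cellstep_append b m n fw c fl nx]

lemma pv_loop_eq (b : List (List Char)) (m n : Int) (fw : Nat) (hcl : pvClean b m n) :
    ∀ (f : Nat) (fl : PySem.Set (Int × Int)) (frontier : List (Int × Int)),
      pvLoopA b m n fw f (((fl.length : Int) - 1), fl, frontier)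
        = ((pvFloodB b m n fw f fl frontier).length : Int) - 1 := by
  intro f
  induction f with
  | zero => intro fl fr; rfl
  | succ f ih =>
    intro fl fr
    rw [pvLoopA, pvFloodB]
    by_cases hfr : fr = []
    · subst hfr; simp
    · dsimp only
      rw [if_neg hfr, if_neg hfr]
      have hlev := pv_level_eq b m n fw hcl fr fl []
      rw [List.append_nil] at hlev
      rw [hlev]
      exact ih (fr.foldl (pvCellStepB b m n fw) (fl, [])).1
        (fr.foldl (pvCellStepB b m n fw) (fl, [])).2

lemma pv_dfs_eq (b : List (List Char)) (m n : Int) (hcl : pvClean b m n) (i j : Int) :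
    pvDfsA b m n i j
      = ((pvFloodB b m n (pvFw m n) (pvFl m n)
          (PySem.Set.ofList [(i, j)]) [(i, j)]).length : Int) - 1 := by
  unfold pvDfsA
  have h1 : PySem.Set.ofList [(i, j)] = [(i, j)] :=
    PySem.Set.ofList_eq_self_of_nodup [(i, j)] (List.nodup_singleton _)
  have h2 := pv_loop_eq b m n (pvFw m n) hcl (pvFl m n) (PySem.Set.ofList [(i, j)]) [(i, j)]
  rw [h1] at h2
  simpa using h2

lemma pv_dirfold_len_ge (b : List (List Char)) (m n : Int) (fw : Nat) (ci cj : Int) :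
    ∀ (ds : List (Int × Int)) (p : PySem.Set (Int × Int) × List (Int × Int)),
      p.1.length ≤ (ds.foldl (pvDirStepB b m n fw ci cj) p).1.length := by
  intro ds
  induction ds with
  | nil => intro p; exact le_refl _
  | cons d t ih =>
    intro p
    refine le_trans ?_ (ih (pvDirStepB b m n fw ci cj p d))
    exact pv_update_length_ge _ p.1

lemma pv_frontfold_len_ge (b : List (List Char)) (m n : Int) (fw : Nat) :
    ∀ (fr : List (Int × Int)) (p : PySem.Set (Int × Int) × List (Int × Int)),
      p.1.length ≤ (fr.foldl (pvCellStepB b m n fw) p).1.length := by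
  intro fr
  induction fr with
  | nil => intro p; exact le_refl _
  | cons c t ih =>
    intro p
    refine le_trans ?_ (ih (pvCellStepB b m n fw p c))
    exact pv_dirfold_len_ge b m n fw c.1 c.2 pvDirs p

lemma pv_flood_len_ge (b : List (List Char)) (m n : Int) (fw : Nat) :
    ∀ (f : Nat) (fl : PySem.Set (Int × Int)) (fr : List (Int × Int)),
      fl.length ≤ (pvFloodB b m n fw f fl fr).length := by
  intro f
  induction f with
  | zero => intro fl fr; exact le_refl _
  | succ f ih =>
    intro fl fr
    rw [pvFloodB]
    by_cases hfr : fr = []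
    · subst hfr; simp
    · dsimp only
      rw [if_neg hfr]
      exact le_trans (pv_frontfold_len_ge b m n fw fr (fl, [])) (ih _ _)

-- fold-shape bridges for the outer max loops
lemma pv_inner_fold (P : Int → Prop) [DecidablePred P] (fA fB : Int → Int) :
    ∀ (l : List Int), (∀ j ∈ l, P j → fA j = fB j) →
      ∀ (ans : Int),
        l.foldl (fun ans j => if P j then max ans (fA j) else ans) ans
          = (l.filterMap (fun j => if P j then some (fB j) else none)).foldl max ans := by
  intro l
  induction l with
  | nil => intro _ _; rfl
  | cons j t ih =>
    intro h ans
    by_cases hp : P j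
    · simp only [List.foldl_cons, List.filterMap_cons, if_pos hp]
      rw [h j (by simp) hp]
      exact ih (fun x hx => h x (by simp [hx])) (max ans (fB j))
    · simp only [List.foldl_cons, List.filterMap_cons, if_neg hp]
      exact ih (fun x hx => h x (by simp [hx])) ans

lemma pv_outer_fold (gA : Int → Int → Int) (K : Int → List Int) :
    ∀ (l : List Int), (∀ i ∈ l, ∀ a, gA a i = (K i).foldl max a) →
      ∀ (ans : Int), l.foldl gA ans = (l.flatMap K).foldl max ans := by
  intro l
  induction l with
  | nil => intro _ _; rfl
  | cons i t ih =>
    intro h ans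
    simp only [List.foldl_cons, List.flatMap_cons, List.foldl_append]
    rw [h i (by simp) ans]
    exact ih (fun x hx => h x (by simp [hx])) ((K i).foldl max ans)

lemma pv_max_getD (vals : List Int) (h : ∀ v ∈ vals, 0 ≤ v) :
    vals.foldl max 0 = (PySem.List.max? vals (fun x => x)).getD 0 := by
  cases vals with
  | nil => simp [show PySem.List.max? ([] : List Int) (fun x => x) = none from by
      simp [PySem.List.max?_eq_none_iff]]
  | cons x t =>
    rw [PySem.List.max?_id_cons]
    simp only [Option.getD_some, List.foldl_cons]
    rw [max_eq_right (h x (by simp))]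

-- locating an in-bounds cell inside its row's scanned prefix
lemma pv_cell_mem (cb : List String)
    (hrows : ∀ r ∈ cb, (cb.headD "").toList.length ≤ r.toList.length)
    (i j : Int) (hi0 : 0 ≤ i) (him : i < (cb.length : Int)) (hj0 : 0 ≤ j)
    (hjn : j < (((cb.headD "").toList.length : Nat) : Int)) :
    ∃ r ∈ cb, pvCell (cb.map (fun s => s.toList)) i j
      ∈ r.toList.take (cb.headD "").toList.length := by
  have hi' : i.toNat < cb.length := by omega
  have hj' : j.toNat < (cb.headD "").toList.length := by omega
  refine ⟨cb[i.toNat], List.getElem_mem hi', ?_⟩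
  have hlen : (cb.headD "").toList.length ≤ cb[i.toNat].toList.length :=
    hrows _ (List.getElem_mem hi')
  have hrow : (cb.map (fun s => s.toList)).getD i.toNat [] = cb[i.toNat].toList := by
    rw [List.getD_eq_getElem?_getD, List.getElem?_eq_getElem (by simpa using hi')]
    simp
  have hcell : pvCell (cb.map (fun s => s.toList)) i j
      = cb[i.toNat].toList[j.toNat]'(by omega) := by
    unfold pvCell
    rw [hrow, List.getD_eq_getElem?_getD, List.getElem?_eq_getElem (by omega)]
    simp
  rw [hcell]
  have hmem : (cb[i.toNat].toList.take ((cb.headD "").toList.length))[j.toNat]'(by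
        simp only [List.length_take]; omega)
      ∈ cb[i.toNat].toList.take ((cb.headD "").toList.length) := List.getElem_mem _
  rwa [List.getElem_take] at hmem

-- ===== VERDICT (by name: the statement is the Claim_ definition above) =====
theorem flipChess_spec : Claim_equal_flipChess := by
  intro cb _hdom hpre
  obtain ⟨hne, hrowsB, hdotcleanB⟩ := hpre
  have hrows : ∀ r ∈ cb, (cb.headD "").toList.length ≤ r.toList.length := by
    simpa using hrowsB
  have hdotclean : (∃ r ∈ cb, '.' ∈ r.toList.take (cb.headD "").toList.length) →
      ∀ r ∈ cb, ∀ c ∈ r.toList.take (cb.headD "").toList.length,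
        c = '.' ∨ c = 'X' ∨ c = 'O' := by
    intro hex r hr c hc
    have hall := hdotcleanB (by simpa using hex)
    have := (by simpa using hall :
      ∀ x ∈ cb, ∀ y ∈ List.take (cb.head?.getD "").length x.toList,
        (y = '.' ∨ y = 'X') ∨ y = 'O') r hr c (by simpa using hc)
    tauto
  unfold Spec_flipChess flipChess flipChess_alt
  dsimp only
  by_cases hdot : ∃ r ∈ cb, '.' ∈ r.toList.take (cb.headD "").toList.length
  · -- a clean board: the two floods agree cell by cell
    have hclean : pvClean (cb.map (fun s => s.toList)) (cb.length : Int)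
        (((cb.headD "").toList.length : Nat) : Int) := by
      intro i j hi0 him hj0 hjn
      obtain ⟨r, hr, hmem⟩ := pv_cell_mem cb hrows i j hi0 him hj0 hjn
      exact hdotclean hdot r hr _ hmem
    have key : ∀ i ∈ PySem.List.pyRange 0 ((cb.length : Nat) : Int) 1, ∀ a : Int,
        (PySem.List.pyRange 0 (((cb.headD "").toList.length : Nat) : Int) 1).foldl
          (fun ans j => if pvCell (cb.map (fun s => s.toList)) i j = '.' then
            max ans (pvDfsA (cb.map (fun s => s.toList)) (cb.length : Int)
              (((cb.headD "").toList.length : Nat) : Int) i j) else ans) a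
        = ((PySem.List.pyRange 0 (((cb.headD "").toList.length : Nat) : Int) 1).filterMap
            (fun j => if pvCell (cb.map (fun s => s.toList)) i j = '.' then
              some (((pvFloodB (cb.map (fun s => s.toList)) (cb.length : Int)
                (((cb.headD "").toList.length : Nat) : Int)
                (pvFw (cb.length : Int) (((cb.headD "").toList.length : Nat) : Int))
                (pvFl (cb.length : Int) (((cb.headD "").toList.length : Nat) : Int))
                (PySem.Set.ofList [(i, j)]) [(i, j)]).length : Int) - 1)
            else none)).foldl max a := by
      intro i _ a
      exact pv_inner_fold _ _ _ _ (fun j _ _ => pv_dfs_eq _ _ _ hclean i j) a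
    rw [pv_outer_fold _ _ _ key 0]
    apply pv_max_getD
    intro v hv
    rw [List.mem_flatMap] at hv
    obtain ⟨i, _, hv⟩ := hv
    rw [List.mem_filterMap] at hv
    obtain ⟨j, _, hj⟩ := hv
    by_cases hc : pvCell (cb.map (fun s => s.toList)) i j = '.'
    · rw [if_pos hc, Option.some.injEq] at hj
      subst hj
      have h1 : (PySem.Set.ofList [(i, j)]).length = 1 := by
        rw [PySem.Set.ofList_eq_self_of_nodup [(i, j)] (List.nodup_singleton _)]
        rfl
      have := pv_flood_len_ge (cb.map (fun s => s.toList)) (cb.length : Int)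
        (((cb.headD "").toList.length : Nat) : Int)
        (pvFw (cb.length : Int) (((cb.headD "").toList.length : Nat) : Int))
        (pvFl (cb.length : Int) (((cb.headD "").toList.length : Nat) : Int))
        (PySem.Set.ofList [(i, j)]) [(i, j)]
      rw [h1] at this
      omega
    · rw [if_neg hc] at hj
      exact absurd hj (by simp)
  · -- no empty cell in the scanned area: both sides are 0
    have hnodot : ∀ i j : Int, 0 ≤ i → i < (cb.length : Int) → 0 ≤ j →
        j < (((cb.headD "").toList.length : Nat) : Int) →
        ¬ pvCell (cb.map (fun s => s.toList)) i j = '.' := by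
      intro i j hi0 him hj0 hjn hc
      obtain ⟨r, hr, hmem⟩ := pv_cell_mem cb hrows i j hi0 him hj0 hjn
      rw [hc] at hmem
      exact hdot ⟨r, hr, hmem⟩
    have hA : (PySem.List.pyRange 0 ((cb.length : Nat) : Int) 1).foldl
        (fun ans i => (PySem.List.pyRange 0 (((cb.headD "").toList.length : Nat) : Int) 1).foldl
          (fun ans j => if pvCell (cb.map (fun s => s.toList)) i j = '.' then
            max ans (pvDfsA (cb.map (fun s => s.toList)) (cb.length : Int)
              (((cb.headD "").toList.length : Nat) : Int) i j) else ans) ans) 0 = 0 := by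
      rw [PySem.List.foldl_congr_mem (g := fun (a : Int) (_ : Int) => a)]
      · exact PySem.List.foldl_ignore _ _
      · intro acc i hi
        rw [PySem.List.foldl_congr_mem (g := fun (a : Int) (_ : Int) => a)]
        · exact PySem.List.foldl_ignore _ _
        · intro a j hjmem
          rw [PySem.List.mem_pyRange_one] at hi hjmem
          rw [if_neg (hnodot i j (by omega) (by omega) (by omega) (by omega))]
    have hB : (PySem.List.pyRange 0 ((cb.length : Nat) : Int) 1).flatMap
        (fun i => (PySem.List.pyRange 0 (((cb.headD "").toList.length : Nat) : Int) 1).filterMap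
          (fun j => if pvCell (cb.map (fun s => s.toList)) i j = '.' then
            some (((pvFloodB (cb.map (fun s => s.toList)) (cb.length : Int)
              (((cb.headD "").toList.length : Nat) : Int)
              (pvFw (cb.length : Int) (((cb.headD "").toList.length : Nat) : Int))
              (pvFl (cb.length : Int) (((cb.headD "").toList.length : Nat) : Int))
              (PySem.Set.ofList [(i, j)]) [(i, j)]).length : Int) - 1)
          else none)) = [] := by
      rw [List.flatMap_eq_nil_iff]
      intro i hi
      rw [List.filterMap_eq_nil_iff]
      intro j hjmem
      rw [PySem.List.mem_pyRange_one] at hi hjmem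
      rw [if_neg (hnodot i j (by omega) (by omega) (by omega) (by omega))]
    rw [hA, hB]
    simp [show PySem.List.max? ([] : List Int) (fun x => x) = none from by
      simp [PySem.List.max?_eq_none_iff]]
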